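-- pv_equiv track=rewrite | github.com/sunwoo0067/yooni_03 | backend/tests/unit/test_pricing_service.py | calculate_revenue_optimization
-- ===== SOURCE A (Python) =====
-- def calculate_revenue_optimization(price_demand_data):
--     best_price = None
--     best_revenue = 0
--
--     for data in price_demand_data:
--         revenue = data["price"] * data["demand"]
--         if revenue > best_revenue:
--             best_revenue = revenue
--             best_price = data["price"]
--
--     return best_price
-- ===== SOURCE B (Python) =====
-- def calculate_revenue_optimization(price_demand_data):
--     revenues = [d["price"] * d["demand"] for d in price_demand_data]
--     best = max(revenues, default=0)
--     if best <= 0: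
--         return None
--     for d, r in zip(price_demand_data, revenues):
--         if r == best:
--             return d["price"]
-- ===== Notes on version B (the rewrite author's own statement) =====
-- stated objective: alternative
-- what changed: Replaces the single stateful best-price/best-revenue scan with a two-pass decomposition: compute all revenues, take their maximum with max(), then return the price of the first entry attaining that maximum if it is positive.
import Mathlib
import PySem

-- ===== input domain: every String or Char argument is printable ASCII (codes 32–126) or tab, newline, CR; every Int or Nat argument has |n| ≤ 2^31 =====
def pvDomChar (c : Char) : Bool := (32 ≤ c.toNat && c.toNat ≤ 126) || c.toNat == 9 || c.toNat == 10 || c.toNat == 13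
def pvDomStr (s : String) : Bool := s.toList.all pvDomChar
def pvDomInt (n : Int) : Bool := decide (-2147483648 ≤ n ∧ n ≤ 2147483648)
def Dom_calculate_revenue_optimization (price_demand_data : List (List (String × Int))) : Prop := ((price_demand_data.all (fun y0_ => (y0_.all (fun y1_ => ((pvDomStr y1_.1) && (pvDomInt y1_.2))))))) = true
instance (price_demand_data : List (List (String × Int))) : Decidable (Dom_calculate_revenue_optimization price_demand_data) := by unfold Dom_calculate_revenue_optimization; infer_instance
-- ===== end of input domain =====

-- B changes the decomposition: two passes (all revenues, max(), then first entry attaining it) instead of A's single stateful best-price/best-revenue scan; same O(n) cost.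

-- d["k"] on the assoc-list dict: first match; exact whenever the key is present (a missing
-- key is a Python KeyError, excluded by Pre_ below; the 0 default is never reached there).
def pvVal (d : List (String × Int)) (k : String) : Int :=
  ((d.find? (fun kv => kv.1 == k)).map (fun kv => kv.2)).getD 0

def pvRev (d : List (String × Int)) : Int := pvVal d "price" * pvVal d "demand"

-- ===== PORT A =====
def pvStepA (s : Option Int × Int) (d : List (String × Int)) : Option Int × Int :=
  if pvRev d > s.2 then (some (pvVal d "price"), pvRev d) else s

def calculate_revenue_optimization (price_demand_data : List (List (String × Int))) : Option Int :=
  (price_demand_data.foldl pvStepA ((none : Option Int), (0 : Int))).1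

-- ===== PORT B =====
def calculate_revenue_optimization_alt (price_demand_data : List (List (String × Int))) : Option Int :=
  let revenues := price_demand_data.map pvRev
  let best := (PySem.List.max? revenues (fun x => x)).getD 0
  if best ≤ 0 then none
  else
    match (price_demand_data.zip revenues).find? (fun p => p.2 == best) with
    | some p => some (pvVal p.1 "price")
    | none => none

-- ===== PRECONDITION & SPEC =====
-- Pre_ excludes exactly the entries with a missing "price" or "demand" key, on which Python A raises KeyError.
def Pre_calculate_revenue_optimization (price_demand_data : List (List (String × Int))) : Prop :=
  (price_demand_data.all (fun d => d.any (fun kv => kv.1 == "price") && d.any (fun kv => kv.1 == "demand"))) = true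
instance (price_demand_data : List (List (String × Int))) : Decidable (Pre_calculate_revenue_optimization price_demand_data) := by unfold Pre_calculate_revenue_optimization; infer_instance

def pvWitness_calculate_revenue_optimization : (List (List (String × Int))) :=
  [[("price", 3), ("demand", 2)], [("price", 5), ("demand", 1)]]

def Spec_calculate_revenue_optimization (price_demand_data : List (List (String × Int))) (out : Option Int) : Prop := out = calculate_revenue_optimization_alt price_demand_data
instance (price_demand_data : List (List (String × Int))) (out : Option Int) : Decidable (Spec_calculate_revenue_optimization price_demand_data out) := by unfold Spec_calculate_revenue_optimization; infer_instance

-- ===== CLAIM (what is proved, stated in full; the proofs are below) =====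
def Claim_equal_calculate_revenue_optimization : Prop := ∀ (price_demand_data : List (List (String × Int))), Dom_calculate_revenue_optimization price_demand_data → Pre_calculate_revenue_optimization price_demand_data → Spec_calculate_revenue_optimization price_demand_data (calculate_revenue_optimization price_demand_data)

-- ===== LEMMAS AND PROOFS =====

-- running max of revenues starting from c
def pvMx (c : Int) (l : List (List (String × Int))) : Int :=
  l.foldl (fun a d => max a (pvRev d)) c

lemma pvMx_le (l : List (List (String × Int))) : ∀ c : Int, c ≤ pvMx c l := by
  induction l with
  | nil => intro c; simp [pvMx]
  | cons d t ih =>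
    intro c
    have h := ih (max c (pvRev d))
    simp only [pvMx, List.foldl_cons] at *
    exact le_trans (le_max_left _ _) h

lemma pvMx_exch (l : List (List (String × Int))) : ∀ a b : Int, pvMx (max a b) l = max a (pvMx b l) := by
  induction l with
  | nil => intro a b; simp [pvMx]
  | cons d t ih =>
    intro a b
    simp only [pvMx, List.foldl_cons] at *
    rw [max_assoc, ih]

lemma pvMx_eq_of_not_any (l : List (List (String × Int))) :
    ∀ c : Int, (l.any (fun d => decide (c < pvRev d))) = false → pvMx c l = c := by
  induction l with
  | nil => intro c _; simp [pvMx]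
  | cons d t ih =>
    intro c h
    simp only [List.any_cons, Bool.or_eq_false_iff, decide_eq_false_iff_not, not_lt] at h
    simp only [pvMx, List.foldl_cons]
    have : max c (pvRev d) = c := max_eq_left h.1
    rw [this]
    exact ih c (by simpa using h.2)

lemma pvMx_gt_of_any (l : List (List (String × Int))) :
    ∀ c : Int, (l.any (fun d => decide (c < pvRev d))) = true → c < pvMx c l := by
  induction l with
  | nil => intro c h; simp at h
  | cons d t ih =>
    intro c h
    simp only [List.any_cons, Bool.or_eq_true, decide_eq_true_eq] at h
    simp only [pvMx, List.foldl_cons]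
    cases h with
    | inl h =>
      have h1 : max c (pvRev d) = pvRev d := max_eq_right (le_of_lt h)
      rw [h1]
      exact lt_of_lt_of_le h (pvMx_le t _)
    | inr h =>
      by_cases hcd : c < pvRev d
      · rw [max_eq_right (le_of_lt hcd)]
        exact lt_of_lt_of_le hcd (pvMx_le t _)
      · rw [max_eq_left (le_of_not_gt hcd)]
        exact ih c (by simpa using h)

-- characterization of A's fold
lemma pvFoldA (l : List (List (String × Int))) :
    ∀ (bp : Option Int) (br : Int),
      l.foldl pvStepA (bp, br) =
        ((if l.any (fun d => decide (br < pvRev d)) then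
            (l.find? (fun d => pvRev d == pvMx br l)).map (fun d => pvVal d "price")
          else bp),
         pvMx br l) := by
  induction l with
  | nil => intro bp br; simp [pvMx]
  | cons d t ih =>
    intro bp br
    simp only [List.foldl_cons, pvStepA]
    by_cases h : pvRev d > br
    · simp only [if_pos h]
      rw [ih]
      have hmx : pvMx br (d :: t) = pvMx (pvRev d) t := by
        simp only [pvMx, List.foldl_cons]
        rw [max_eq_right (le_of_lt h)]
      have hany : (List.any (d :: t) fun d => decide (br < pvRev d)) = true := by
        simp [h]
      rw [hmx, if_pos hany]
      by_cases ht : (t.any (fun e => decide (pvRev d < pvRev e))) = true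
      · have hgt : pvRev d < pvMx (pvRev d) t := pvMx_gt_of_any t _ ht
        rw [if_pos ht]
        have hne : (pvRev d == pvMx (pvRev d) t) = false := by
          simp [ne_of_lt hgt]
        simp [hne]
      · have heq : pvMx (pvRev d) t = pvRev d :=
          pvMx_eq_of_not_any t _ (by simpa using ht)
        rw [if_neg (by simpa using ht)]
        have hbe : (pvRev d == pvMx (pvRev d) t) = true := by simp [heq]
        simp [hbe]
    · simp only [if_neg h]
      rw [ih]
      have hle : pvRev d ≤ br := le_of_not_gt h
      have hmx : pvMx br (d :: t) = pvMx br t := by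
        simp only [pvMx, List.foldl_cons]
        rw [max_eq_left hle]
      have hany : (List.any (d :: t) fun e => decide (br < pvRev e)) =
          (t.any (fun e => decide (br < pvRev e))) := by
        simp [not_lt.mpr hle]
      rw [hmx, hany]
      by_cases ht : (t.any (fun e => decide (br < pvRev e))) = true
      · have hgt : br < pvMx br t := pvMx_gt_of_any t _ ht
        have hne : (pvRev d == pvMx br t) = false := by
          simp [ne_of_lt (lt_of_le_of_lt hle hgt)]
        rw [if_pos ht, if_pos ht]
        simp [hne]
      · rw [if_neg ht, if_neg ht]

lemma pvZipFind (l : List (List (String × Int))) (m : Int) :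
    (l.zip (l.map pvRev)).find? (fun p => p.2 == m) =
      (l.find? (fun d => pvRev d == m)).map (fun d => (d, pvRev d)) := by
  induction l with
  | nil => simp
  | cons d t ih =>
    simp only [List.map_cons, List.zip_cons_cons, List.find?_cons]
    by_cases h : (pvRev d == m) = true
    · simp [h]
    · simp only [Bool.not_eq_true] at h
      simp [h, ih]

lemma pvMaxRevs (d : List (String × Int)) (t : List (List (String × Int))) :
    (PySem.List.max? ((d :: t).map pvRev) (fun x => x)).getD 0 = pvMx (pvRev d) t := by
  rw [List.map_cons, PySem.List.max?_id_cons]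
  simp [pvMx, List.foldl_map]

-- ===== VERDICT (by name: the statement is the Claim_ definition above) =====
theorem calculate_revenue_optimization_spec : Claim_equal_calculate_revenue_optimization := by
  intro l _ _
  unfold Spec_calculate_revenue_optimization calculate_revenue_optimization calculate_revenue_optimization_alt
  cases l with
  | nil => simp
  | cons d t =>
    rw [pvFoldA (d :: t) none 0]
    simp only []
    rw [pvMaxRevs d t]
    have hmx0 : pvMx 0 (d :: t) = max 0 (pvMx (pvRev d) t) := by
      simp only [pvMx, List.foldl_cons]
      have := pvMx_exch t 0 (pvRev d)
      simpa [pvMx] using this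
    by_cases hb : pvMx (pvRev d) t ≤ 0
    · rw [if_pos hb]
      have hany : ((d :: t).any (fun e => decide ((0:Int) < pvRev e))) = false := by
        cases hc : ((d :: t).any (fun e => decide ((0:Int) < pvRev e))) with
        | false => rfl
        | true =>
          have := pvMx_gt_of_any (d :: t) 0 hc
          rw [hmx0] at this
          omega
      rw [if_neg (by simp [hany])]
    · rw [if_neg hb]
      rw [not_le] at hb
      have hmxeq : pvMx 0 (d :: t) = pvMx (pvRev d) t := by
        rw [hmx0]; exact max_eq_right (le_of_lt hb)
      have hany : ((d :: t).any (fun e => decide ((0:Int) < pvRev e))) = true := by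
        cases hc : ((d :: t).any (fun e => decide ((0:Int) < pvRev e))) with
        | true => rfl
        | false =>
          have := pvMx_eq_of_not_any (d :: t) 0 hc
          rw [hmxeq] at this
          omega
      rw [if_pos hany, hmxeq]
      rw [pvZipFind (d :: t) (pvMx (pvRev d) t)]
      cases hf : (d :: t).find? (fun e => pvRev e == pvMx (pvRev d) t) with
      | none => simp
      | some e => simp
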